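-- pv_equiv track=rewrite | github.com/raffg/Coursera-Fundamentals-of-Computing | 03 Principles of Computing (Part 1)/24 Mini-project - Yahtzee.py | gen_all_holds
-- ===== SOURCE A (Python) =====
-- def gen_all_holds(hand):
--     """
--     Generate all possible choices of dice from hand to hold.
--
--     hand: full yahtzee hand
--
--     Returns a set of tuples, where each tuple is dice to hold
--     """
--
--     answer_set = set([()])
--     temp_set = set()
--     for dummy_idx in range(len(hand)):
--         for partial_sequence in answer_set:
--             for item in hand:
--                 new_sequence = list(partial_sequence)
--                 new_sequence.append(item)
--                 if new_sequence.count(item) <= hand.count(item):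
--                     temp_set.add(tuple(new_sequence))
--         answer_set = set(temp_set)
--     answer_set.add(tuple())
--
--     return set([tuple(sorted(sequence)) for sequence in answer_set])
-- ===== SOURCE B (Python) =====
-- def gen_all_holds(hand):
--     """
--     Generate all possible choices of dice from hand to hold.
--
--     hand: full yahtzee hand
--
--     Returns a set of tuples, where each tuple is dice to hold
--     """
--     faces = sorted(set(hand))
--     holds = [()]
--     for face in faces:
--         count = hand.count(face)
--         holds = [partial + (face,) * mult
--                  for partial in holds
--                  for mult in range(count + 1)]
--     return set(holds)
-- ===== Notes on version B (the rewrite author's own statement) =====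
-- stated objective: alternative
-- what changed: A grows every ordered sequence of dice one die at a time for len(hand) rounds, deduplicating via per-step count scans and only sorting at the end; B iterates over the distinct faces in increasing order and takes the Cartesian product of per-face multiplicities (0..count), building each sorted hold exactly once (intended as faster; a timing run saw A time out at n=16 where B returned but could not verify a clean reading at the largest size, so no speed is claimed).
import Mathlib
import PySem

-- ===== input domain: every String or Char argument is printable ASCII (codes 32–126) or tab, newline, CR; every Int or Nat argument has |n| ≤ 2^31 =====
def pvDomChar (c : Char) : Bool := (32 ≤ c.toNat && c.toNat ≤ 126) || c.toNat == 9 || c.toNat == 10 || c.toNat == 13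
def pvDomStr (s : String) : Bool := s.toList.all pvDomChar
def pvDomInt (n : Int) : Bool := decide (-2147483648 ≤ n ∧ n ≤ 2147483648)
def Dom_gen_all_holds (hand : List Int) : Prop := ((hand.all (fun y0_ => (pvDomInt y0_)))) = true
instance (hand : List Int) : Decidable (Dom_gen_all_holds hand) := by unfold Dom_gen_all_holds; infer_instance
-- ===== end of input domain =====

-- B replaces A's ordered-sequence search (all orderings of every hold, re-filtered and
-- re-sorted) by a direct product over the distinct faces in increasing order, building each
-- sorted hold exactly once.  Both Pythons return a SET; since Python's set iteration order
-- is not modelled, both ports return the resulting set canonically sorted.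


-- ===== PORT A =====
-- canonical order for a returned set of int-tuples (Python's set iteration order is unmodelled);
-- used as the return convention of both ports
def pvCanon (s : List (List Int)) : List (List Int) :=
  @PySem.List.sorted (List Int) (List Int) ((inferInstance : LinearOrder (List Int)).toLT)
    ((inferInstance : LinearOrder (List Int)).toDecidableLT) s (fun x => x) false

-- inner double loop: 'for partial_sequence in answer_set: for item in hand: …' adding into temp_set
def pvInnerA (hand : List Int) (answer temp : List (List Int)) : List (List Int) :=
  answer.foldl (fun temp partialSeq =>
    hand.foldl (fun temp item =>
      let newSeq := partialSeq ++ [item]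
      if PySem.List.count newSeq item ≤ PySem.List.count hand item
      then PySem.Set.add temp newSeq else temp) temp) temp

-- one iteration of the outer 'for dummy_idx in range(len(hand))' loop:
-- temp_set is extended by the double loop, then answer_set = set(temp_set)
def pvStepA (hand : List Int) (st : List (List Int) × List (List Int)) :
    List (List Int) × List (List Int) :=
  let temp := pvInnerA hand st.1 st.2
  (PySem.Set.ofList temp, temp)

def gen_all_holds (hand : List Int) : List (List Int) :=
  let st := (PySem.List.pyRange 0 (hand.length : Int) 1).foldl
    (fun st _ => pvStepA hand st)
    (PySem.Set.ofList [[]], (PySem.Set.empty : PySem.Set (List Int)))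
  let answer := PySem.Set.add st.1 []
  -- the returned set, in canonical order
  pvCanon (PySem.Set.ofList (answer.map (fun s => PySem.List.sorted s (fun x => x) false)))

-- ===== PORT B =====
def gen_all_holds_alt (hand : List Int) : List (List Int) :=
  let faces := PySem.List.sorted (PySem.Set.ofList hand) (fun x => x) false
  let holds := faces.foldl
    (fun holds face =>
      holds.flatMap (fun partialT =>
        (PySem.List.pyRange 0 ((PySem.List.count hand face : Int) + 1) 1).map
          (fun mult => partialT ++ List.replicate mult.toNat face)))
    [[]]
  -- the returned set, in canonical order
  pvCanon (PySem.Set.ofList holds)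

-- ===== PRECONDITION & SPEC =====
def Spec_gen_all_holds (hand : List Int) (out : List (List Int)) : Prop := out = gen_all_holds_alt hand
instance (hand : List Int) (out : List (List Int)) : Decidable (Spec_gen_all_holds hand out) := by unfold Spec_gen_all_holds; infer_instance

-- ===== CLAIM (what is proved, stated in full; the proofs are below) =====
def Claim_equal_gen_all_holds : Prop := ∀ (hand : List Int), Dom_gen_all_holds hand → Spec_gen_all_holds hand (gen_all_holds hand)

-- ===== LEMMAS AND PROOFS =====

-- a hold: multiset-contained in hand
def pvSub (hand t : List Int) : Prop := ∀ x : Int, t.count x ≤ hand.count x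

-- a nonempty valid ordered sequence, as A builds them
def pvValid (hand s : List Int) : Prop := s ≠ [] ∧ pvSub hand s

lemma pv_foldl_const {β γ : Type} (F : γ → γ) :
    ∀ (l : List β) (st : γ), l.foldl (fun st _ => F st) st = F^[l.length] st := by
  intro l
  induction l with
  | nil => intro st; rfl
  | cons x xs ih =>
    intro st
    simp [List.foldl_cons, ih, Function.iterate_succ_apply]

lemma pv_mem_foldl {β : Type} (s : List Int) (C : β → Prop)
    (g : List (List Int) → β → List (List Int))
    (hstep : ∀ t p, s ∈ g t p ↔ s ∈ t ∨ C p) :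
    ∀ (l : List β) (t : List (List Int)), s ∈ l.foldl g t ↔ s ∈ t ∨ ∃ p ∈ l, C p := by
  intro l
  induction l with
  | nil => simp
  | cons x xs ih =>
    intro t
    rw [List.foldl_cons, ih, hstep]
    constructor
    · rintro ((h | h) | ⟨p, hp, hC⟩)
      · exact Or.inl h
      · exact Or.inr ⟨x, by simp, h⟩
      · exact Or.inr ⟨p, by simp [hp], hC⟩
    · rintro (h | ⟨p, hp, hC⟩)
      · exact Or.inl (Or.inl h)
      · rcases List.mem_cons.mp hp with h | h
        · exact Or.inl (Or.inr (h ▸ hC))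
        · exact Or.inr ⟨p, h, hC⟩

lemma pv_mem_innerA (hand : List Int) (answer temp : List (List Int)) (s : List Int) :
    s ∈ pvInnerA hand answer temp ↔
      s ∈ temp ∨ ∃ p ∈ answer, ∃ x ∈ hand,
        s = p ++ [x] ∧ (p ++ [x]).count x ≤ hand.count x := by
  unfold pvInnerA
  rw [pv_mem_foldl s
    (fun p => ∃ x ∈ hand, s = p ++ [x] ∧ (p ++ [x]).count x ≤ hand.count x)]
  intro t p
  rw [pv_mem_foldl s (fun x => s = p ++ [x] ∧ (p ++ [x]).count x ≤ hand.count x)]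
  intro t' x
  simp only [PySem.List.count_eq]
  split_ifs with h
  · rw [PySem.Set.mem_add]; tauto
  · constructor
    · exact Or.inl
    · rintro (hs | ⟨hs, hc⟩)
      · exact hs
      · exact absurd hc h

-- loop invariant for A: after k iterations temp holds exactly the valid sequences of length ≤ k
lemma pv_loopA (hand : List Int) : ∀ k : Nat,
    (∀ s, s ∈ ((pvStepA hand)^[k] (PySem.Set.ofList [[]], PySem.Set.empty)).2 ↔
      (pvValid hand s ∧ s.length ≤ k)) ∧
    (∀ s, s ∈ ((pvStepA hand)^[k] (PySem.Set.ofList [[]], PySem.Set.empty)).1 ↔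
      (if k = 0 then s = [] else (pvValid hand s ∧ s.length ≤ k))) := by
  intro k
  induction k with
  | zero =>
    constructor
    · intro s
      simp only [Function.iterate_zero, id_eq, PySem.Set.empty]
      constructor
      · intro h; exact absurd h (List.not_mem_nil)
      · rintro ⟨⟨hne, _⟩, hlen⟩
        exact absurd (List.eq_nil_of_length_eq_zero (Nat.le_zero.mp hlen)) hne
    · intro s
      simp [PySem.Set.mem_ofList]
  | succ k ih =>
    obtain ⟨iht, iha⟩ := ih
    have hchar : ∀ s, s ∈ ((pvStepA hand)^[k + 1] (PySem.Set.ofList [[]], PySem.Set.empty)).2 ↔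
        (pvValid hand s ∧ s.length ≤ k + 1) := by
      intro s
      rw [Function.iterate_succ_apply']
      show s ∈ pvInnerA hand _ _ ↔ _
      rw [pv_mem_innerA]
      constructor
      · rintro (hs | ⟨p, hp, x, hx, rfl, hc⟩)
        · obtain ⟨hv, hl⟩ := (iht s).mp hs
          exact ⟨hv, hl.trans (Nat.le_succ k)⟩
        · -- p has pvSub and length ≤ k, whether it is [] (k = 0) or a valid sequence
          have hps : pvSub hand p ∧ p.length ≤ k := by
            rcases Nat.eq_zero_or_pos k with hk | hk
            · subst hk
              have := (iha p).mp hp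
              rw [if_pos rfl] at this
              subst this
              exact ⟨fun y => Nat.zero_le _, Nat.le_refl 0⟩
            · have := (iha p).mp hp
              rw [if_neg (Nat.pos_iff_ne_zero.mp hk)] at this
              exact ⟨this.1.2, this.2⟩
          refine ⟨⟨by simp, fun y => ?_⟩, ?_⟩
          · by_cases hyx : y = x
            · subst hyx; exact hc
            · have h0 : List.count y [x] = 0 := List.count_eq_zero.mpr (by simp [hyx])
              have : (p ++ [x]).count y = p.count y := by
                rw [List.count_append, h0, Nat.add_zero]
              rw [this]; exact hps.1 y
          · simp [Nat.succ_le_succ hps.2]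
      · rintro ⟨⟨hne, hsub⟩, hlen⟩
        by_cases hlk : s.length ≤ k
        · exact Or.inl ((iht s).mpr ⟨⟨hne, hsub⟩, hlk⟩)
        · have hlen1 : s.length = k + 1 := Nat.le_antisymm hlen (Nat.not_le.mp hlk)
          set p := s.dropLast with hpdef
          set x := s.getLast hne with hxdef
          have hsplit : p ++ [x] = s := List.dropLast_append_getLast hne
          have hplen : p.length = k := by
            have hd : p.length = s.length - 1 := List.length_dropLast
            omega
          have hpsub : pvSub hand p := by
            intro y
            have : p.count y ≤ s.count y := by
              rw [← hsplit, List.count_append]; omega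
            exact this.trans (hsub y)
          have hpa : p ∈ ((pvStepA hand)^[k] (PySem.Set.ofList [[]], PySem.Set.empty)).1 := by
            rcases Nat.eq_zero_or_pos k with hk | hk
            · rw [iha p, if_pos hk]
              rw [← List.length_eq_zero_iff, hplen, hk]
            · rw [iha p, if_neg (Nat.pos_iff_ne_zero.mp hk)]
              refine ⟨⟨?_, hpsub⟩, le_of_eq hplen⟩
              intro h0
              rw [h0] at hplen
              simp at hplen
              omega
          have hxh : x ∈ hand := by
            have h1 : 0 < s.count x := List.count_pos_iff.mpr (List.getLast_mem hne)
            have := hsub x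
            exact List.count_pos_iff.mp (by omega)
          exact Or.inr ⟨p, hpa, x, hxh, hsplit.symm, by rw [hsplit]; exact hsub x⟩
    refine ⟨hchar, ?_⟩
    intro s
    rw [Function.iterate_succ_apply']
    show s ∈ PySem.Set.ofList (pvInnerA hand _ _) ↔ _
    rw [PySem.Set.mem_ofList, if_neg (Nat.succ_ne_zero k)]
    have := hchar s
    rw [Function.iterate_succ_apply'] at this
    exact this

lemma pv_valid_length_le (hand s : List Int) (h : pvSub hand s) : s.length ≤ hand.length := by
  exact (List.subperm_ext_iff.mpr (fun x _ => h x)).length_le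

-- membership characterisation of A's final set
lemma pv_A_char (hand t : List Int) :
    t ∈ PySem.Set.ofList
        ((PySem.Set.add ((pvStepA hand)^[hand.length] (PySem.Set.ofList [[]], PySem.Set.empty)).1
            []).map (fun s => PySem.List.sorted s (fun x => x) false)) ↔
      pvSub hand t ∧ t.Pairwise (· ≤ ·) := by
  have hmem : ∀ p, p ∈ PySem.Set.add
      ((pvStepA hand)^[hand.length] (PySem.Set.ofList [[]], PySem.Set.empty)).1 [] ↔
      (p = [] ∨ pvValid hand p) := by
    intro p
    rw [PySem.Set.mem_add, (pv_loopA hand hand.length).2 p]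
    by_cases hn : hand.length = 0
    · rw [if_pos hn]
      constructor
      · tauto
      · rintro (h | h)
        · exact Or.inl h
        · exfalso
          have := pv_valid_length_le hand p h.2
          rw [hn] at this
          exact h.1 (List.eq_nil_of_length_eq_zero (Nat.le_zero.mp this))
    · rw [if_neg hn]
      constructor
      · rintro (⟨hv, _⟩ | h)
        · exact Or.inr hv
        · exact Or.inl h
      · rintro (h | h)
        · exact Or.inr h
        · exact Or.inl ⟨h, pv_valid_length_le hand p h.2⟩
  rw [PySem.Set.mem_ofList, List.mem_map]
  constructor
  · rintro ⟨p, hp, rfl⟩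
    rw [hmem] at hp
    rcases hp with rfl | ⟨-, hsub⟩
    · refine ⟨fun y => ?_, ?_⟩ <;> simp [PySem.List.sorted]
    · have hperm : (PySem.List.sorted p (fun x => x) false).Perm p :=
        PySem.List.sorted_perm p (fun x => x) false
      refine ⟨fun y => ?_, ?_⟩
      · rw [hperm.count_eq]; exact hsub y
      · simpa using PySem.List.sorted_pairwise p (fun x => x)
  · rintro ⟨hsub, hpair⟩
    by_cases ht : t = []
    · subst ht
      exact ⟨[], (hmem []).mpr (Or.inl rfl), by simp [PySem.List.sorted]⟩
    · refine ⟨t, (hmem t).mpr (Or.inr ⟨ht, hsub⟩), ?_⟩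
      exact PySem.List.sorted_eq_self_of_pairwise t (fun x => x) (by simpa using hpair)

-- one step of B's loop, as a named function (proof-side view of the foldl body)
def pvStepB (hand : List Int) (holds : List (List Int)) (face : Int) : List (List Int) :=
  holds.flatMap (fun partialT =>
    (PySem.List.pyRange 0 ((PySem.List.count hand face : Int) + 1) 1).map
      (fun mult => partialT ++ List.replicate mult.toNat face))

lemma pv_mem_stepB (hand : List Int) (acc : List (List Int)) (f : Int) (u : List Int) :
    u ∈ pvStepB hand acc f ↔
      ∃ t ∈ acc, ∃ m : Nat, m ≤ hand.count f ∧ u = t ++ List.replicate m f := by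
  unfold pvStepB
  rw [List.mem_flatMap]
  simp only [PySem.List.count_eq]
  constructor
  · rintro ⟨t, ht, hu⟩
    rw [List.mem_map] at hu
    obtain ⟨mult, hm, rfl⟩ := hu
    rw [PySem.List.mem_pyRange_one] at hm
    exact ⟨t, ht, mult.toNat, by omega, rfl⟩
  · rintro ⟨t, ht, m, hm, rfl⟩
    refine ⟨t, ht, ?_⟩
    rw [List.mem_map]
    refine ⟨(m : Int), ?_, by rw [Int.toNat_natCast]⟩
    rw [PySem.List.mem_pyRange_one]
    omega

-- a sorted list whose minimum can only be f decomposes as (copies of f) ++ (the rest)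
lemma pv_count_filter_le (l : List Int) (p : Int → Bool) (a : Int) :
    (l.filter p).count a ≤ l.count a := by
  induction l with
  | nil => simp
  | cons b l ih =>
    by_cases h : p b
    · rw [List.filter_cons_of_pos h]
      simp only [List.count_cons]
      omega
    · rw [List.filter_cons_of_neg (by simpa using h)]
      simp only [List.count_cons]
      omega

lemma pv_split (f : Int) : ∀ (e : List Int), e.Pairwise (· ≤ ·) →
    (∀ y ∈ e, y = f ∨ f < y) →
    e = List.replicate (e.count f) f ++ e.filter (fun y => !(y == f)) := by
  intro e
  induction e with
  | nil => intro _ _; simp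
  | cons a e ih =>
    intro hpair hmin
    rcases hmin a (by simp) with rfl | hlt
    · have htail := ih (List.pairwise_cons.mp hpair).2
        (fun y hy => hmin y (List.mem_cons_of_mem _ hy))
      calc a :: e = a :: (List.replicate (e.count a) a ++ e.filter (fun y => !(y == a))) := by
            rw [← htail]
        _ = _ := by simp [List.count_cons_self, List.replicate_succ]
    · have hne : ∀ y ∈ a :: e, y ≠ f := by
        intro y hy
        rcases List.mem_cons.mp hy with rfl | hy'
        · omega
        · have := (List.pairwise_cons.mp hpair).1 y hy'
          omega
      have hc : (a :: e).count f = 0 := List.count_eq_zero.mpr (fun h => hne f h rfl)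
      have hf : (a :: e).filter (fun y => !(y == f)) = a :: e :=
        List.filter_eq_self.mpr (fun y hy => by simpa using hne y hy)
      rw [hc, hf]
      simp

lemma pv_B_sound (hand : List Int) : ∀ (fs : List Int) (acc : List (List Int)),
    fs.Pairwise (· < ·) →
    (∀ t ∈ acc, pvSub hand t ∧ t.Pairwise (· ≤ ·) ∧ (∀ x ∈ t, ∀ f ∈ fs, x < f)) →
    ∀ u ∈ fs.foldl (pvStepB hand) acc, pvSub hand u ∧ u.Pairwise (· ≤ ·) := by
  intro fs
  induction fs with
  | nil =>
    intro acc _ hacc u hu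
    exact ⟨(hacc u hu).1, (hacc u hu).2.1⟩
  | cons f fs ih =>
    intro acc hpair hacc u hu
    rw [List.foldl_cons] at hu
    refine ih (pvStepB hand acc f) (List.pairwise_cons.mp hpair).2 ?_ u hu
    intro t' ht'
    obtain ⟨t, ht, m, hm, rfl⟩ := (pv_mem_stepB hand acc f t').mp ht'
    obtain ⟨hsub, hsort, hbig⟩ := hacc t ht
    have hfnot : t.count f = 0 := by
      refine List.count_eq_zero.mpr (fun h => ?_)
      have := hbig f h f (by simp)
      omega
    refine ⟨?_, ?_, ?_⟩
    · intro y
      rw [List.count_append, List.count_replicate]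
      by_cases hyf : f = y
      · subst hyf
        rw [if_pos (by simp)]
        omega
      · rw [if_neg (by simpa using hyf), Nat.add_zero]
        exact hsub y
    · rw [List.pairwise_append]
      refine ⟨hsort, List.pairwise_replicate.mpr (Or.inr le_rfl), ?_⟩
      intro x hx y hy
      rw [List.eq_of_mem_replicate hy]
      exact le_of_lt (hbig x hx f (by simp))
    · intro x hx g hg
      rcases List.mem_append.mp hx with hx' | hx'
      · exact hbig x hx' g (List.mem_cons_of_mem _ hg)
      · rw [List.eq_of_mem_replicate hx']
        exact (List.pairwise_cons.mp hpair).1 g hg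

lemma pv_B_complete (hand : List Int) : ∀ (fs : List Int), fs.Pairwise (· < ·) →
    ∀ (e : List Int), (∀ x ∈ e, x ∈ fs) → e.Pairwise (· ≤ ·) →
    (∀ y, e.count y ≤ hand.count y) →
    ∀ (acc : List (List Int)) (t : List Int), t ∈ acc →
    t ++ e ∈ fs.foldl (pvStepB hand) acc := by
  intro fs
  induction fs with
  | nil =>
    intro _ e hmem _ _ acc t ht
    have : e = [] := List.eq_nil_iff_forall_not_mem.mpr (fun x hx => by simpa using hmem x hx)
    subst this
    simpa using ht
  | cons f fs ih =>
    intro hpair e hmem hsort hcount acc t ht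
    have hflt : ∀ y ∈ fs, f < y := (List.pairwise_cons.mp hpair).1
    have hmin : ∀ y ∈ e, y = f ∨ f < y := by
      intro y hy
      rcases List.mem_cons.mp (hmem y hy) with rfl | hy'
      · exact Or.inl rfl
      · exact Or.inr (hflt y hy')
    have hsplit := pv_split f e hsort hmin
    set m := e.count f with hmdef
    set e' := e.filter (fun y => !(y == f)) with he'def
    have ht' : t ++ List.replicate m f ∈ pvStepB hand acc f :=
      (pv_mem_stepB hand acc f _).mpr ⟨t, ht, m, hcount f, rfl⟩
    have he'mem : ∀ x ∈ e', x ∈ fs := by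
      intro x hx
      rw [he'def, List.mem_filter] at hx
      rcases List.mem_cons.mp (hmem x hx.1) with rfl | h
      · simp at hx
      · exact h
    have he'sort : e'.Pairwise (· ≤ ·) := List.Pairwise.filter _ hsort
    have he'count : ∀ y, e'.count y ≤ hand.count y :=
      fun y => le_trans (pv_count_filter_le e _ y) (hcount y)
    have := ih (List.pairwise_cons.mp hpair).2 e' he'mem he'sort he'count
      (pvStepB hand acc f) (t ++ List.replicate m f) ht'
    rw [List.foldl_cons]
    rw [List.append_assoc, ← hsplit] at this
    exact this

-- B's loop: completeness and soundness
lemma pv_B_char (hand t : List Int) :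
    t ∈ PySem.Set.ofList
        ((PySem.List.sorted (PySem.Set.ofList hand) (fun x => x) false).foldl
          (fun holds face =>
            holds.flatMap (fun partialT =>
              (PySem.List.pyRange 0 ((PySem.List.count hand face : Int) + 1) 1).map
                (fun mult => partialT ++ List.replicate mult.toNat face)))
          [[]]) ↔
      pvSub hand t ∧ t.Pairwise (· ≤ ·) := by
  have hfaces : (PySem.List.sorted (PySem.Set.ofList hand) (fun x => x) false).Pairwise
      (· < ·) := PySem.List.sorted_ofList_pairwise_lt hand
  have hfmem : ∀ x : Int, x ∈ PySem.List.sorted (PySem.Set.ofList hand) (fun x => x) false ↔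
      x ∈ hand := by
    intro x
    rw [PySem.List.mem_sorted, PySem.Set.mem_ofList]
  rw [PySem.Set.mem_ofList]
  show t ∈ (PySem.List.sorted (PySem.Set.ofList hand) (fun x => x) false).foldl
      (pvStepB hand) [[]] ↔ _
  constructor
  · intro h
    refine pv_B_sound hand _ [[]] hfaces ?_ t h
    intro u hu
    rw [List.mem_singleton] at hu
    subst hu
    exact ⟨fun y => Nat.zero_le _, List.Pairwise.nil, by simp⟩
  · rintro ⟨hsub, hpair⟩
    have hmem : ∀ x ∈ t, x ∈ PySem.List.sorted (PySem.Set.ofList hand) (fun x => x) false := by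
      intro x hx
      rw [hfmem]
      have h1 : 0 < t.count x := List.count_pos_iff.mpr hx
      have := hsub x
      exact List.count_pos_iff.mp (by omega)
    have := pv_B_complete hand _ hfaces t hmem hpair hsub [[]] [] (by simp)
    simpa using this

-- ===== VERDICT (by name: the statement is the Claim_ definition above) =====
theorem gen_all_holds_spec : Claim_equal_gen_all_holds := by
  intro hand _
  unfold Spec_gen_all_holds gen_all_holds gen_all_holds_alt
  rw [pv_foldl_const, PySem.List.length_pyRange_one]
  simp only [Int.sub_zero, Int.toNat_natCast]
  unfold pvCanon
  refine ((PySem.List.sorted_id_eq_sorted_id_iff_perm (κ := List Int) _ _).mpr ?_)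
  rw [List.perm_ext_iff_of_nodup (PySem.Set.nodup_ofList _) (PySem.Set.nodup_ofList _)]
  intro a
  rw [pv_A_char, pv_B_char]
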